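-- pv_equiv track=rewrite | github.com/jilljenn/stage-python | web/_static/interfaces/interface_boites/Nirogen.py | ia
-- ===== SOURCE A (Python) =====
-- def ia(b):
--
--     t = len (b)
--     for i in range(t):
--
--         if b[i] > b[t-i-1]:
--             valeur = b[i]
--             return "G"
--
--         elif b[i] < b[t-i-1] :
--             valeur = b[t-i-1]
--             return "D"
-- ===== SOURCE B (Python) =====
-- def ia(b):
--     r = b[::-1]
--     if b > r:
--         return "G"
--     if b < r:
--         return "D"
-- ===== Notes on version B (the rewrite author's own statement) =====
-- stated objective: idiomatic
-- what changed: Replaces the explicit indexed loop comparing b[i] with b[t-i-1] by computing the reversed list once and using Python's built-in lexicographic list comparison b > b[::-1] / b < b[::-1].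
import Mathlib
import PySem

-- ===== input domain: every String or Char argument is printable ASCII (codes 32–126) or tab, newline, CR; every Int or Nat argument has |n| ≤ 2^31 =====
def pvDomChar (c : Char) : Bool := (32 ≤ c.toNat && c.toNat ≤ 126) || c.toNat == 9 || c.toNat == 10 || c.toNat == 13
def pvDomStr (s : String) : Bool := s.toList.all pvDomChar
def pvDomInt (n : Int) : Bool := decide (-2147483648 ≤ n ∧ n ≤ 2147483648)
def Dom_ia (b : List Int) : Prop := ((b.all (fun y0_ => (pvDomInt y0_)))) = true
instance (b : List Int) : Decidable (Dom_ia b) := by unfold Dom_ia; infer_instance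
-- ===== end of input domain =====

-- B replaces A's indexed outside-in loop by one lexicographic comparison of b with its reverse (idiomatic, same cost).

-- ===== PORT A =====
-- the 'for i in range(t)' loop; early return on the first mismatch.
def iaLoop (b : List Int) (t : Int) : List Int → Option String
  | [] => none
  | i :: rest =>
    match PySem.List.pyGet? b i, PySem.List.pyGet? b (t - i - 1) with
    | some x, some y =>
      if x > y then some "G"
      else if x < y then some "D"
      else iaLoop b t rest
    | _, _ => none   -- IndexError (unreachable: i ∈ range(t))

def ia (b : List Int) : Option String :=
  let t : Int := PySem.List.len b
  iaLoop b t (PySem.List.pyRange 0 t 1)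

-- ===== PORT B =====
-- Python's lexicographic '<' on lists of ints.
def pyListLt : List Int → List Int → Bool
  | [], [] => false
  | [], _ :: _ => true
  | _ :: _, [] => false
  | x :: xs, y :: ys => if x = y then pyListLt xs ys else decide (x < y)

def ia_alt (b : List Int) : Option String :=
  let r : List Int := (PySem.List.slice? b none none (-1)).getD []  -- b[::-1]; step -1 ≠ 0, never none
  if pyListLt r b then some "G"       -- b > r
  else if pyListLt b r then some "D"  -- b < r
  else none

-- ===== PRECONDITION & SPEC =====
def Spec_ia (b : List Int) (out : Option String) : Prop := out = ia_alt b
instance (b : List Int) (out : Option String) : Decidable (Spec_ia b out) := by unfold Spec_ia; infer_instance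

-- ===== CLAIM (what is proved, stated in full; the proofs are below) =====
def Claim_equal_ia : Prop := ∀ (b : List Int), Dom_ia b → Spec_ia b (ia b)

-- ===== LEMMAS AND PROOFS =====

theorem iaLoop_eq (b : List Int) (n : Nat) (hn : n = b.length) :
    ∀ d j, j ≤ n → n - j = d →
      iaLoop b (n : Int) (PySem.List.pyRange (j : Int) (n : Int) 1) =
        (if pyListLt (b.reverse.drop j) (b.drop j) then some "G"
         else if pyListLt (b.drop j) (b.reverse.drop j) then some "D" else none) := by
  intro d
  induction d with
  | zero =>
      intro j hj hd
      have hjn : j = n := by omega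
      subst hjn
      rw [PySem.List.pyRange_one_eq_nil (le_refl _)]
      have h1 : b.drop j = [] := List.drop_eq_nil_of_le (by omega)
      have h2 : b.reverse.drop j = [] := List.drop_eq_nil_of_le (by simp; omega)
      simp [iaLoop, h1, h2, pyListLt]
  | succ d ih =>
      intro j hj hd
      have hjlt : j < n := by omega
      have hjb : j < b.length := by omega
      have hjr : j < b.reverse.length := by simpa using hjb
      rw [PySem.List.pyRange_one_cons (by exact_mod_cast hjlt)]
      have hidx : ((n : Int) - (j : Int) - 1) = ((n - 1 - j : Nat) : Int) := by
        omega
      have hnj : n - 1 - j < b.length := by omega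
      have hrev : b.reverse[j] = b[n - 1 - j] := by
        rw [List.getElem_reverse]; congr 1; omega
      have h1 : PySem.List.pyGet? b ((j : Int)) = some b[j] := by
        simp [PySem.List.pyGet?_natCast, List.getElem?_eq_getElem hjb]
      have h2 : PySem.List.pyGet? b ((n : Int) - (j : Int) - 1) = some b[n - 1 - j] := by
        rw [hidx]
        simp [PySem.List.pyGet?_natCast, List.getElem?_eq_getElem hnj]
      have hdropb : b.drop j = b[j] :: b.drop (j + 1) := List.drop_eq_getElem_cons hjb
      have hdropr : b.reverse.drop j = b.reverse[j] :: b.reverse.drop (j + 1) :=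
        List.drop_eq_getElem_cons hjr
      have harith : ((j : Int) + 1) = ((j + 1 : Nat) : Int) := by push_cast; ring
      rw [iaLoop, h1, h2, hdropb, hdropr, hrev]
      by_cases hgt : b[j] > b[n - 1 - j]
      · simp [pyListLt, hgt, (ne_of_gt hgt).symm]
      · by_cases hlt : b[j] < b[n - 1 - j]
        · simp [pyListLt, hgt, hlt, ne_of_lt hlt, (ne_of_lt hlt).symm]
        · have heq : b[j] = b[n - 1 - j] := le_antisymm (not_lt.mp hgt) (not_lt.mp hlt)
          rw [harith, ih (j + 1) (by omega) (by omega)]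
          simp [pyListLt, heq]

theorem ia_eq_alt (b : List Int) : ia b = ia_alt b := by
  have hmain := iaLoop_eq b b.length rfl (b.length - 0) 0 (Nat.zero_le _) rfl
  simp only [Nat.cast_zero, List.drop_zero] at hmain
  unfold ia ia_alt
  rw [PySem.List.slice?_none_none_neg_one]
  simp only [PySem.List.len_eq, Option.getD_some]
  exact hmain

-- ===== VERDICT (by name: the statement is the Claim_ definition above) =====
theorem ia_spec : Claim_equal_ia := by
  intro b _
  unfold Spec_ia
  exact ia_eq_alt b
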